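-- pv_equiv track=rewrite | github.com/iQuHACK/2025-QuEra | team-solutions/Duckbergs/assets/valid_move_generator.py | find_free_adjacent_pair
-- ===== SOURCE A (Python) =====
-- from typing import List, Tuple, Dict, Union
-- from typing import Callable, List, Tuple, Dict
--
-- def find_free_adjacent_pair(
--     positions_list: List[int],
--     adjacency: List[Tuple[int,int]],
--     q1: int,
--     q2: int
-- )->Union[Tuple[int,int], None]:
--     used_map= {}
--     for qq,pos in enumerate(positions_list):
--         used_map.setdefault(pos,[]).append(qq)
--     for (a,b) in adjacency:
--         occA= used_map.get(a,[])
--         occB= used_map.get(b,[])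
--         if all(x in (q1,q2) for x in occA) and all(x in (q1,q2) for x in occB):
--             return (a,b)
--     return None
-- ===== SOURCE B (Python) =====
-- def find_free_adjacent_pair(positions_list, adjacency, q1, q2):
--     for a, b in adjacency:
--         ok = True
--         for qq, pos in enumerate(positions_list):
--             if (pos == a or pos == b) and qq != q1 and qq != q2:
--                 ok = False
--                 break
--         if ok:
--             return (a, b)
--     return None
-- ===== Notes on version B (the rewrite author's own statement) =====
-- stated objective: simpler
-- what changed: Drops the used_map grouping dict entirely: B scans adjacency and, per edge, rescans enumerate(positions_list) directly, rejecting the edge as soon as a qubit other than q1/q2 sits on one of its endpoints.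
import Mathlib
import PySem

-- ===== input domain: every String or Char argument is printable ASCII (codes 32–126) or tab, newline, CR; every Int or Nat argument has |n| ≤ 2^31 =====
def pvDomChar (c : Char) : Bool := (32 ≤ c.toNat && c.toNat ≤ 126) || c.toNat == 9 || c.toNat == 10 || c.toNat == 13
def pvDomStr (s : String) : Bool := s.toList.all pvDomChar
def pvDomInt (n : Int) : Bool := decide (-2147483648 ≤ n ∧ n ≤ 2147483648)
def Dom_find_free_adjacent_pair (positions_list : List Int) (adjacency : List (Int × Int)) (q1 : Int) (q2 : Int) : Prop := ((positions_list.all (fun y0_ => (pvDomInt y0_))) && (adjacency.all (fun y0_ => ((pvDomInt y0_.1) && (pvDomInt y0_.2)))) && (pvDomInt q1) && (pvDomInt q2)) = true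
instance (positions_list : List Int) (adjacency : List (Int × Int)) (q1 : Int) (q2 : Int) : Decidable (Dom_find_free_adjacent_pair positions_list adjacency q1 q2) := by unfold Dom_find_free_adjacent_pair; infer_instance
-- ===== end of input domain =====

-- B drops A's used_map grouping dict: it rescans enumerate(positions_list) per edge,
-- rejecting an edge as soon as a qubit other than q1/q2 occupies one of its endpoints (objective: simpler).

-- ===== PORT A =====
-- the loop over adjacency, with the precomputed used_map
def ffapScanA (d : PySem.Dict Int (List Int)) (q1 q2 : Int) : List (Int × Int) → Option (Int × Int)
  | [] => none
  | (a, b) :: rest =>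
    let occA := d.getD a []
    let occB := d.getD b []
    if occA.all (fun x => x == q1 || x == q2) && occB.all (fun x => x == q1 || x == q2) then
      some (a, b)
    else
      ffapScanA d q1 q2 rest

def find_free_adjacent_pair (positions_list : List Int) (adjacency : List (Int × Int)) (q1 : Int) (q2 : Int) : Option (Int × Int) :=
  -- used_map.setdefault(pos,[]).append(qq)  ==  modify pos [] (· ++ [qq])
  let used_map := (PySem.List.enumerate positions_list).foldl
    (fun d qp => d.modify qp.2 [] (· ++ [qp.1])) PySem.Dict.empty
  ffapScanA used_map q1 q2 adjacency

-- ===== PORT B =====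
-- inner loop of B: True iff no (qq,pos) with pos ∈ {a,b} and qq ∉ {q1,q2}
def ffapOkB (positions_list : List Int) (a b q1 q2 : Int) : Bool :=
  (PySem.List.enumerate positions_list).all
    (fun qp => !((qp.2 == a || qp.2 == b) && !(qp.1 == q1) && !(qp.1 == q2)))

def find_free_adjacent_pair_alt (positions_list : List Int) (adjacency : List (Int × Int)) (q1 : Int) (q2 : Int) : Option (Int × Int) :=
  match adjacency with
  | [] => none
  | (a, b) :: rest =>
    if ffapOkB positions_list a b q1 q2 then some (a, b)
    else find_free_adjacent_pair_alt positions_list rest q1 q2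

-- ===== PRECONDITION & SPEC =====
def Spec_find_free_adjacent_pair (positions_list : List Int) (adjacency : List (Int × Int)) (q1 : Int) (q2 : Int) (out : Option (Int × Int)) : Prop := out = find_free_adjacent_pair_alt positions_list adjacency q1 q2
instance (positions_list : List Int) (adjacency : List (Int × Int)) (q1 : Int) (q2 : Int) (out : Option (Int × Int)) : Decidable (Spec_find_free_adjacent_pair positions_list adjacency q1 q2 out) := by unfold Spec_find_free_adjacent_pair; infer_instance

-- ===== CLAIM (what is proved, stated in full; the proofs are below) =====
def Claim_equal_find_free_adjacent_pair : Prop := ∀ (positions_list : List Int) (adjacency : List (Int × Int)) (q1 : Int) (q2 : Int), Dom_find_free_adjacent_pair positions_list adjacency q1 q2 → Spec_find_free_adjacent_pair positions_list adjacency q1 q2 (find_free_adjacent_pair positions_list adjacency q1 q2)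

-- ===== LEMMAS AND PROOFS =====

-- A's used_map.get(c, []) is exactly the indices qq with positions_list[qq] = c, in order
lemma ffap_getD (l : List (Int × Int)) (c : Int) :
    ((l.foldl (fun d qp => d.modify qp.2 [] (· ++ [qp.1])) PySem.Dict.empty).getD c []) =
    (l.filter (fun qp => qp.2 == c)).map (·.1) := by
  have h := PySem.Dict.getD_foldl_modify_append (l := l.map Prod.swap)
      (d := (PySem.Dict.empty : PySem.Dict Int (List Int))) (c := c)
  rw [List.foldl_map] at h
  simpa [Prod.swap, List.filter_map, Function.comp] using h

-- per-edge: A's test on the two occupancy lists equals B's single rescan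
lemma ffap_cond_eq (l : List (Int × Int)) (a b q1 q2 : Int) :
    (((l.filter (fun qp => qp.2 == a)).map (·.1)).all (fun x => x == q1 || x == q2) &&
     ((l.filter (fun qp => qp.2 == b)).map (·.1)).all (fun x => x == q1 || x == q2)) =
    l.all (fun qp => !((qp.2 == a || qp.2 == b) && !(qp.1 == q1) && !(qp.1 == q2))) := by
  rw [Bool.eq_iff_iff]
  simp only [Bool.and_eq_true, List.all_eq_true, List.mem_map, List.mem_filter,
    beq_iff_eq, Bool.or_eq_true, Bool.not_eq_true', Bool.and_eq_false_iff, Bool.not_eq_false']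
  constructor
  · rintro ⟨h1, h2⟩ qp hm
    by_cases hqa : qp.2 = a
    · rcases h1 qp.1 ⟨qp, ⟨hm, hqa⟩, rfl⟩ with h | h <;> simp [h]
    · by_cases hqb : qp.2 = b
      · rcases h2 qp.1 ⟨qp, ⟨hm, hqb⟩, rfl⟩ with h | h <;> simp [h]
      · simp [hqa, hqb]
  · intro h
    constructor <;> rintro x ⟨qp, ⟨hm, hq⟩, rfl⟩ <;> have := h qp hm <;>
      simp [hq] at this <;> rcases this with h' | h' <;> simp [h']

-- the two adjacency scans agree edge by edge
lemma ffap_scan_eq (positions_list : List Int) (q1 q2 : Int) :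
    ∀ adjacency : List (Int × Int),
      ffapScanA ((PySem.List.enumerate positions_list).foldl
          (fun d qp => d.modify qp.2 [] (· ++ [qp.1])) PySem.Dict.empty) q1 q2 adjacency =
      find_free_adjacent_pair_alt positions_list adjacency q1 q2
  | [] => rfl
  | (a, b) :: rest => by
    simp only [ffapScanA, find_free_adjacent_pair_alt]
    rw [ffap_getD, ffap_getD, ffap_cond_eq]
    unfold ffapOkB
    rw [ffap_scan_eq positions_list q1 q2 rest]

-- ===== VERDICT (by name: the statement is the Claim_ definition above) =====
theorem find_free_adjacent_pair_spec : Claim_equal_find_free_adjacent_pair := by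
  intro positions_list adjacency q1 q2 _
  unfold Spec_find_free_adjacent_pair find_free_adjacent_pair
  exact ffap_scan_eq positions_list q1 q2 adjacency
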